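-- pv_equiv track=rewrite | github.com/Albmargar1/CA-Log | functions.py | set_teams
-- ===== SOURCE A (Python) =====
-- def set_teams(first_pick):
--     teams = {'A': ['-P0-', '-P1-'], 'B': ['-P2-', '-P3-']}
--
--     turn = ['A', 'B'] if first_pick == 'A' else ['B', 'A']
--     for i in range(1, 8):
--         teams[turn[0]].append(f'-P{4 * i + 0}-')
--         teams[turn[1]].append(f'-P{4 * i + 1}-')
--         teams[turn[1]].append(f'-P{4 * i + 2}-')
--         teams[turn[0]].append(f'-P{4 * i + 3}-')
--
--         turn[0], turn[1] = turn[1], turn[0]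
--
--     return teams['A'], teams['B']
-- ===== SOURCE B (Python) =====
-- def set_teams(first_pick):
--     first = 'A' if first_pick == 'A' else 'B'
--     second = 'B' if first == 'A' else 'A'
--
--     def team_of(p):
--         if p < 4:
--             return 'A' if p < 2 else 'B'
--         g, pos = divmod(p, 4)
--         turn0 = first if g % 2 == 1 else second
--         turn1 = second if turn0 == first else first
--         return turn0 if pos in (0, 3) else turn1
--
--     team_a = [f'-P{p}-' for p in range(32) if team_of(p) == 'A']
--     team_b = [f'-P{p}-' for p in range(32) if team_of(p) != 'A']
--     return team_a, team_b
-- ===== Notes on version B (the rewrite author's own statement) =====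
-- stated objective: alternative
-- what changed: B replaces A's dict-mutating four-appends-then-swap group loop with a per-player closed-form team function (parity of p//4 and p%4 in {0,3}) and two comprehensions over range(32).
import Mathlib
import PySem

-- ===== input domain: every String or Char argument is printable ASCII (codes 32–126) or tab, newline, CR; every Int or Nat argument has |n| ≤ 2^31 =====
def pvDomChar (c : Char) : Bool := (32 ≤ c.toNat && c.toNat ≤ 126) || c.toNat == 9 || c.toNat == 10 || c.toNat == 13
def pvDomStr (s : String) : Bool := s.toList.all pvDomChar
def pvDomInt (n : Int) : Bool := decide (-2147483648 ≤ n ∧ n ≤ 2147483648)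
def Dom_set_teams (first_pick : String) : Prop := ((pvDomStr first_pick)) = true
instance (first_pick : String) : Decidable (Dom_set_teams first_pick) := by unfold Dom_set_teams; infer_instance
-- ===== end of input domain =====

-- B computes each player's team from a closed-form function of the index instead of
-- A's dict-mutating group loop with a swap; same values everywhere (objective: alternative).

-- ===== PORT A =====
-- f'-P{n}-'
def pvLabel (n : Int) : String := "-P" ++ PySem.Int.toStr n ++ "-"

-- port of A: dict of the two teams, turn held as a pair (turn[0], turn[1]), loop over range(1,8)
def set_teams (first_pick : String) : List String × List String :=
  let teams : PySem.Dict String (List String) :=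
    PySem.Dict.ofList [("A", ["-P0-", "-P1-"]), ("B", ["-P2-", "-P3-"])]
  let turn : String × String := if first_pick == "A" then ("A", "B") else ("B", "A")
  let (teams, _) := (PySem.List.pyRange 1 8 1).foldl
    (fun (st : PySem.Dict String (List String) × (String × String)) i =>
      let (teams, turn) := st
      let teams := teams.modify turn.1 [] (· ++ [pvLabel (4 * i + 0)])
      let teams := teams.modify turn.2 [] (· ++ [pvLabel (4 * i + 1)])
      let teams := teams.modify turn.2 [] (· ++ [pvLabel (4 * i + 2)])
      let teams := teams.modify turn.1 [] (· ++ [pvLabel (4 * i + 3)])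
      (teams, (turn.2, turn.1)))
    (teams, turn)
  (teams.getD "A" [], teams.getD "B" [])

-- ===== PORT B =====
-- port of B's team_of(p)
def pvTeamOf (first second : String) (p : Int) : String :=
  if p < 4 then (if p < 2 then "A" else "B")
  else
    let g := PySem.Int.floordiv p 4
    let pos := PySem.Int.mod p 4
    let turn0 := if PySem.Int.mod g 2 == 1 then first else second
    let turn1 := if turn0 == first then second else first
    if pos == 0 || pos == 3 then turn0 else turn1

def set_teams_alt (first_pick : String) : List String × List String :=
  let first : String := if first_pick == "A" then "A" else "B"
  let second : String := if first == "A" then "B" else "A"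
  let team_a := ((PySem.List.pyRange 0 32 1).filter (fun p => pvTeamOf first second p == "A")).map pvLabel
  let team_b := ((PySem.List.pyRange 0 32 1).filter (fun p => pvTeamOf first second p != "A")).map pvLabel
  (team_a, team_b)

-- ===== PRECONDITION & SPEC =====
def Spec_set_teams (first_pick : String) (out : List String × List String) : Prop := out = set_teams_alt first_pick
instance (first_pick : String) (out : List String × List String) : Decidable (Spec_set_teams first_pick out) := by unfold Spec_set_teams; infer_instance

-- ===== CLAIM (what is proved, stated in full; the proofs are below) =====
def Claim_equal_set_teams : Prop := ∀ (first_pick : String), Dom_set_teams first_pick → Spec_set_teams first_pick (set_teams first_pick)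

-- ===== LEMMAS AND PROOFS =====
theorem set_teams_beq (fp : String) : set_teams fp = set_teams (if fp == "A" then "A" else "B") := by
  by_cases h : fp = "A" <;> simp [set_teams, h]

theorem set_teams_alt_beq (fp : String) : set_teams_alt fp = set_teams_alt (if fp == "A" then "A" else "B") := by
  by_cases h : fp = "A" <;> simp [set_teams_alt, h]

-- ===== VERDICT (by name: the statement is the Claim_ definition above) =====
theorem set_teams_spec : Claim_equal_set_teams := by
  intro fp _
  unfold Spec_set_teams
  rw [set_teams_beq, set_teams_alt_beq]
  by_cases h : fp = "A" <;> simp [h] <;> decide
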